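-- pv_equiv track=rewrite | github.com/LuiccianDev/daily-challenge-codedex-march-2026 | days/day-07/daylight-savings.py | calculate_sleep_debt
-- ===== SOURCE A (Python) =====
-- def calculate_sleep_debt(planned, actual):
--
--     # Validate input lengths
--     if len(planned) != len(actual):
--         raise ValueError("Planned and actual sleep lists must have the same length.")
--
--     total_debt = 0
--     current_streak = 0
--     longest_streak = 0
--
--     for planned_hours, actual_hours in zip(planned, actual):
--         # Daily sleep debt
--         daily_debt = max(0, planned_hours - actual_hours)
--
--         # Accumulate total debt
--         total_debt += daily_debt
--
--         # Track streaks
--         if daily_debt > 0: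
--             current_streak += 1
--             longest_streak = max(longest_streak, current_streak)
--         else:
--             current_streak = 0
--
--     # Add the Daylight Savings lost hour
--     total_debt += 1
--
--     return total_debt, longest_streak
-- ===== SOURCE B (Python) =====
-- def calculate_sleep_debt(planned, actual):
--     if len(planned) != len(actual):
--         raise ValueError("Planned and actual sleep lists must have the same length.")
--
--     # Pass 1: per-day debts, then total.
--     debts = [max(0, p - a) for p, a in zip(planned, actual)]
--     total_debt = sum(debts) + 1
--
--     # Pass 2: longest run of positive debts, scanned run by run.
--     longest = 0
--     i = 0
--     n = len(debts)
--     while i < n: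
--         if debts[i] > 0:
--             j = i + 1
--             while j < n and debts[j] > 0:
--                 j += 1
--             longest = max(longest, j - i)
--             i = j
--         else:
--             i += 1
--     return total_debt, longest
-- ===== Notes on version B (the rewrite author's own statement) =====
-- stated objective: alternative
-- what changed: A's single fused loop with a current/longest streak accumulator is replaced by two separate passes: a debts list with sum(debts)+1 for the total, and a run-by-run scan that jumps over each maximal block of positive debts to find the longest streak.
import Mathlib
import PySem

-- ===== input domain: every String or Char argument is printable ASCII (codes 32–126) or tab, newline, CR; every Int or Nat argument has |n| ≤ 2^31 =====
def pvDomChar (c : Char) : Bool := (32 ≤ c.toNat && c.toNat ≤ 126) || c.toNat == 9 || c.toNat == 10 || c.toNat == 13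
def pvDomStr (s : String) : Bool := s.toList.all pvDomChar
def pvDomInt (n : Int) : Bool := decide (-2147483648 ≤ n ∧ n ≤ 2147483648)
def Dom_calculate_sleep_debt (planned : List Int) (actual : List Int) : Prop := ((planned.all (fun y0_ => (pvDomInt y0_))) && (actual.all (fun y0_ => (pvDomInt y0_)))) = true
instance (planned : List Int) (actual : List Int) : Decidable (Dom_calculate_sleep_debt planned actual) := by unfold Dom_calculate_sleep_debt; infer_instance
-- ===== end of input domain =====

-- B replaces A's fused accumulator loop with two passes (a debts list + sum, and a run-by-run
-- scan for the longest positive streak); same cost, different decomposition.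

-- ===== PORT A =====
-- A's single loop over zip(planned, actual) with state (total_debt, current_streak, longest_streak).
def calculate_sleep_debt (planned : List Int) (actual : List Int) : Int × Int :=
  let s := (planned.zip actual).foldl
    (fun (st : Int × Int × Int) pa =>
      let daily_debt := max 0 (pa.1 - pa.2)
      if daily_debt > 0 then
        (st.1 + daily_debt, st.2.1 + 1, max st.2.2 (st.2.1 + 1))
      else
        (st.1 + daily_debt, 0, st.2.2))
    (0, 0, 0)
  (s.1 + 1, s.2.2)

-- ===== PORT B =====
-- inner while loop of Source B: length of the leading run of positive debts, and the rest of the list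
def pvRun (ds : List Int) : Nat × List Int :=
  match ds with
  | [] => (0, [])
  | d :: rest =>
      if d > 0 then
        let (k, r) := pvRun rest
        (k + 1, r)
      else (0, d :: rest)

theorem pvRun_len_le : ∀ ds : List Int, (pvRun ds).2.length ≤ ds.length := by
  intro ds
  induction ds with
  | nil => simp [pvRun]
  | cons d rest ih =>
      simp only [pvRun]
      split
      · simpa using Nat.le_succ_of_le ih
      · simp

-- outer while loop of Source B: scan run by run, keeping the longest
def pvScan (ds : List Int) (longest : Int) : Int :=
  match ds with
  | [] => longest
  | d :: rest =>
      if d > 0 then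
        pvScan (pvRun rest).2 (max longest (((pvRun rest).1 : Int) + 1))
      else pvScan rest longest
termination_by ds.length
decreasing_by
  · have := pvRun_len_le rest
    simp only [List.length_cons]
    omega
  · simp

def calculate_sleep_debt_alt (planned : List Int) (actual : List Int) : Int × Int :=
  let debts := (planned.zip actual).map (fun pa => max 0 (pa.1 - pa.2))
  (debts.foldl (· + ·) 0 + 1, pvScan debts 0)

-- ===== PRECONDITION & SPEC =====
-- A raises ValueError when the two lists have different lengths; Pre_ excludes exactly that.
def Pre_calculate_sleep_debt (planned : List Int) (actual : List Int) : Prop :=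
  planned.length = actual.length
instance (planned : List Int) (actual : List Int) : Decidable (Pre_calculate_sleep_debt planned actual) := by unfold Pre_calculate_sleep_debt; infer_instance
def pvWitness_calculate_sleep_debt : List Int × List Int := ([8, 8, 8], [7, 9, 6])

def Spec_calculate_sleep_debt (planned : List Int) (actual : List Int) (out : Int × Int) : Prop := out = calculate_sleep_debt_alt planned actual
instance (planned : List Int) (actual : List Int) (out : Int × Int) : Decidable (Spec_calculate_sleep_debt planned actual out) := by unfold Spec_calculate_sleep_debt; infer_instance

-- ===== CLAIM (what is proved, stated in full; the proofs are below) =====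
def Claim_equal_calculate_sleep_debt : Prop := ∀ (planned : List Int) (actual : List Int), Dom_calculate_sleep_debt planned actual → Pre_calculate_sleep_debt planned actual → Spec_calculate_sleep_debt planned actual (calculate_sleep_debt planned actual)

-- ===== LEMMAS AND PROOFS =====

-- A's loop body, applied to the precomputed daily debt
def pvStep (st : Int × Int × Int) (d : Int) : Int × Int × Int :=
  if d > 0 then (st.1 + d, st.2.1 + 1, max st.2.2 (st.2.1 + 1)) else (st.1 + d, 0, st.2.2)

theorem pvFoldA_eq (planned actual : List Int) :
    (planned.zip actual).foldl
      (fun (st : Int × Int × Int) pa =>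
        let daily_debt := max 0 (pa.1 - pa.2)
        if daily_debt > 0 then
          (st.1 + daily_debt, st.2.1 + 1, max st.2.2 (st.2.1 + 1))
        else
          (st.1 + daily_debt, 0, st.2.2)) (0, 0, 0)
    = ((planned.zip actual).map (fun pa => max 0 (pa.1 - pa.2))).foldl pvStep (0, 0, 0) := by
  rw [List.foldl_map]
  rfl

-- the total component just accumulates the sum
theorem pvFoldlAdd : ∀ (ds : List Int) (t : Int), ds.foldl (· + ·) t = t + ds.foldl (· + ·) 0 := by
  intro ds
  induction ds with
  | nil => intro t; simp
  | cons x xs ihx => intro t; simp only [List.foldl_cons]; rw [ihx, ihx (0 + x)]; ring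

theorem pvFst_fold : ∀ (ds : List Int) (st : Int × Int × Int),
    (ds.foldl pvStep st).1 = st.1 + ds.foldl (· + ·) 0 := by
  intro ds
  induction ds with
  | nil => intro st; simp
  | cons d rest ih =>
      intro st
      simp only [List.foldl_cons, pvStep]
      split <;> rw [ih] <;> simp <;> rw [pvFoldlAdd rest d] <;> ring

-- the longest-streak component depends only on (current, longest)
def pvA2 (ds : List Int) (c l : Int) : Int :=
  match ds with
  | [] => l
  | d :: rest => if d > 0 then pvA2 rest (c + 1) (max l (c + 1)) else pvA2 rest 0 l

theorem pvSnd_fold : ∀ (ds : List Int) (st : Int × Int × Int),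
    (ds.foldl pvStep st).2.2 = pvA2 ds st.2.1 st.2.2 := by
  intro ds
  induction ds with
  | nil => intro st; rfl
  | cons d rest ih =>
      intro st
      simp only [List.foldl_cons, pvStep, pvA2]
      split <;> rw [ih]

-- crossing one maximal run of positives in A's streak recursion
theorem pvA2_run : ∀ (ds : List Int) (c l : Int),
    pvA2 ds c (max l c) = pvA2 (pvRun ds).2 0 (max l (c + (pvRun ds).1)) := by
  intro ds
  induction ds with
  | nil => intro c l; simp [pvRun, pvA2]
  | cons d rest ih =>
      intro c l
      by_cases hd : d > 0
      · have h1 : max (max l c) (c + 1) = max l (c + 1) := by omega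
        simp only [pvA2, pvRun, if_pos hd, h1]
        have := ih (c + 1) l
        rw [this]
        congr 1
        push_cast
        ring
      · simp only [pvA2, pvRun, if_neg hd]
        simp

theorem pvA2_eq_scan : ∀ (n : Nat) (ds : List Int), ds.length ≤ n → ∀ l : Int,
    pvA2 ds 0 l = pvScan ds l := by
  intro n
  induction n with
  | zero =>
      intro ds h l
      have : ds = [] := by cases ds <;> simp_all
      subst this; simp [pvScan, pvA2]
  | succ n ih =>
      intro ds h l
      cases ds with
      | nil => simp [pvScan, pvA2]
      | cons d rest =>
          by_cases hd : d > 0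
          · have hml : max l (0 : Int) = l ⊔ 0 := rfl
            have h0 : pvA2 (d :: rest) 0 l = pvA2 rest 1 (max l 1) := by
              simp [pvA2, if_pos hd]
            have h1 : pvA2 rest 1 (max l 1) = pvA2 (pvRun rest).2 0 (max l (1 + (pvRun rest).1)) := by
              have := pvA2_run rest 1 l
              simpa using this
            have hlen : (pvRun rest).2.length ≤ n := by
              have := pvRun_len_le rest
              simp at h
              omega
            rw [h0, h1, ih _ hlen]
            simp only [pvScan, if_pos hd]
            congr 1
            push_cast
            ring
          · have hlen : rest.length ≤ n := by simp at h; omega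
            simp only [pvA2, pvScan, if_neg hd]
            exact ih rest hlen l

-- ===== VERDICT (by name: the statement is the Claim_ definition above) =====
theorem calculate_sleep_debt_spec : Claim_equal_calculate_sleep_debt := by
  intro planned actual _ _
  unfold Spec_calculate_sleep_debt calculate_sleep_debt calculate_sleep_debt_alt
  rw [pvFoldA_eq]
  set ds := (planned.zip actual).map (fun pa => max 0 (pa.1 - pa.2)) with hds
  have h1 := pvFst_fold ds (0, 0, 0)
  have h2 := pvSnd_fold ds (0, 0, 0)
  have h3 := pvA2_eq_scan ds.length ds le_rfl 0
  simp only at h1 h2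
  rw [Prod.ext_iff]
  constructor
  · simp [h1]
  · simpa [h2] using h3
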